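-- pv_equiv track=rewrite | github.com/msorins/Computational-Logic-Y1S1 | OptionalHomework/numerationBasesModule/classes/numerationBases.py | div
-- ===== SOURCE A (Python) =====
-- def div(a, nr, base):
--     '''
--     :param a: vector
--     :param nr: a number with 1 digit in specified base
--     :param base: numeration base
--     :return: a vector containing the result of a / nr
--     '''
--
--     result = []
--     t = 0
--
--     for i in range(len(a)-1, -1, -1):
--         t = t * base + a[i]
--         newRes = t // nr
--         result.append(newRes)
--         t = t % nr
--
--     while len(result) and result[0] == 0:
--         result.pop(0)
--
--     return result[::-1]
-- ===== SOURCE B (Python) =====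
-- def div(a, nr, base):
--     # Prefix-quotient differences: digit_k = (H_k // nr) - base * (H_{k-1} // nr),
--     # where H_k is the value of the k most-significant digits; no remainder is carried.
--     out = []
--     h = q_prev = 0
--     for d in reversed(a):
--         h = h * base + d
--         q = h // nr
--         out.append(q - base * q_prev)
--         q_prev = q
--     out.reverse()
--     while out and out[-1] == 0:
--         out.pop()
--     return out
-- ===== Notes on version B (the rewrite author's own statement) =====
-- stated objective: alternative
-- what changed: Replaces A's remainder-carrying long division (t = t%nr each step) and its quadratic front-popping strip loop by prefix-quotient differences (digit_k = H_k//nr - base*(H_{k-1}//nr), where H_k is the running prefix value; no remainder or mod is ever computed) followed by reversing once and popping trailing zeros from the back; the growing prefix divisions make B slower than A on large inputs.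
import Mathlib
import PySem

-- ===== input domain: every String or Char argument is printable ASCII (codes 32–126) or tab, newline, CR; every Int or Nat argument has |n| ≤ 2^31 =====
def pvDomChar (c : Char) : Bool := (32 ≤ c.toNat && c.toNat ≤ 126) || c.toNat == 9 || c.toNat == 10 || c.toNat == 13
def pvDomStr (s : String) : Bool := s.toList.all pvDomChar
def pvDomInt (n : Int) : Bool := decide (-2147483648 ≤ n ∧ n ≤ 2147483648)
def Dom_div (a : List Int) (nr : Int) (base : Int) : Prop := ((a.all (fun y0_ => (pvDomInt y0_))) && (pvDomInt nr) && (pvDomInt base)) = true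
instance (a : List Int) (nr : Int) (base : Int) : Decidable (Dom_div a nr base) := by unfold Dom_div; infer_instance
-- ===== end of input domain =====

-- B replaces A's remainder-carrying long division and its front-popping strip loop by
-- prefix-quotient differences (no remainder/mod is ever computed) followed by reverse-and-pop-back.

-- ===== PORT A =====
-- 'while len(result) and result[0] == 0: result.pop(0)' — structural transcription of the strip loop
def divPop : List Int → List Int
  | [] => []
  | x :: xs => if x == 0 then divPop xs else x :: xs

def div (a : List Int) (nr : Int) (base : Int) : List Int :=
  let st := (PySem.List.pyRange ((a.length : Int) - 1) (-1) (-1)).foldl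
    (fun (st : List Int × Int) i =>
      let t := st.2 * base + PySem.List.pyGetD a i 0   -- a[i]; i always in range here
      (st.1 ++ [PySem.Int.floordiv t nr], PySem.Int.mod t nr)) ([], 0)
  (divPop st.1).reverse                                 -- result[::-1] (PySem.List.slice?_none_none_neg_one)

-- ===== PORT B =====
-- 'out.reverse(); while out and out[-1] == 0: out.pop()' — pop the last element while it is 0
def popTrail (l : List Int) : List Int :=
  if h : l.getLast? = some 0 then popTrail l.dropLast else l
termination_by l.length
decreasing_by
  have : l ≠ [] := by intro hnil; rw [hnil] at h; simp at h
  have : 0 < l.length := List.length_pos_iff.mpr this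
  simp [List.length_dropLast]; omega

def div_alt (a : List Int) (nr : Int) (base : Int) : List Int :=
  let st := a.reverse.foldl
    (fun (st : List Int × Int × Int) d =>
      let h := st.2.1 * base + d
      let q := PySem.Int.floordiv h nr
      (st.1 ++ [q - base * st.2.2], h, q)) ([], 0, 0)
  popTrail st.1.reverse

-- ===== PRECONDITION & SPEC =====
-- Pre_ excludes only nr = 0 with a nonempty: there A raises ZeroDivisionError (so does B).
def Pre_div (a : List Int) (nr : Int) (base : Int) : Prop := a = [] ∨ nr ≠ 0
instance (a : List Int) (nr : Int) (base : Int) : Decidable (Pre_div a nr base) := by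
  unfold Pre_div; infer_instance

def pvWitness_div : List Int × Int × Int := ([1, 0, 1], 2, 2)

def Spec_div (a : List Int) (nr : Int) (base : Int) (out : List Int) : Prop := out = div_alt a nr base
instance (a : List Int) (nr : Int) (base : Int) (out : List Int) : Decidable (Spec_div a nr base out) := by unfold Spec_div; infer_instance

-- ===== CLAIM (what is proved, stated in full; the proofs are below) =====
def Claim_equal_div : Prop := ∀ (a : List Int) (nr : Int) (base : Int), Dom_div a nr base → Pre_div a nr base → Spec_div a nr base (div a nr base)

-- ===== LEMMAS AND PROOFS =====

-- the digit list A's loop appends, as a structural recursion (big-endian input L = a.reverse)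
def quotDigits (nr bse t0 : Int) : List Int → List Int
  | [] => []
  | d :: L =>
      PySem.Int.floordiv (t0 * bse + d) nr :: quotDigits nr bse (PySem.Int.mod (t0 * bse + d) nr) L

theorem foldl_fst_eq_quotDigits (nr bse : Int) (L : List Int) :
    ∀ (res0 : List Int) (t0 : Int),
      (L.foldl (fun (st : List Int × Int) d =>
        (st.1 ++ [PySem.Int.floordiv (st.2 * bse + d) nr], PySem.Int.mod (st.2 * bse + d) nr))
        (res0, t0)).1 = res0 ++ quotDigits nr bse t0 L := by
  induction L with
  | nil => intro res0 t0; simp [quotDigits]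
  | cons d L ih =>
      intro res0 t0
      simp only [List.foldl_cons, quotDigits, ih, List.append_assoc, List.singleton_append]

theorem div_eq_quotDigits (a : List Int) (nr base : Int) :
    div a nr base = (divPop (quotDigits nr base 0 a.reverse)).reverse := by
  unfold div
  have h1 : PySem.List.pyRange ((a.length : Int) - 1) (-1) (-1)
      = (PySem.List.pyRange 0 (a.length : Int) 1).reverse := by
    rw [PySem.List.pyRange_neg_one_eq_reverse]; norm_num
  have hmap : (PySem.List.pyRange 0 (a.length : Int) 1).map
      (fun i => PySem.List.pyGetD a i 0) = a := by
    simpa using PySem.List.map_pyGetD_pyRange_zero (xs := a) (d := 0)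
  have h2 : ((PySem.List.pyRange 0 (a.length : Int) 1).reverse).foldl
      (fun (st : List Int × Int) i =>
        (st.1 ++ [PySem.Int.floordiv (st.2 * base + PySem.List.pyGetD a i 0) nr],
         PySem.Int.mod (st.2 * base + PySem.List.pyGetD a i 0) nr)) (([] : List Int), (0:Int))
      = a.reverse.foldl
      (fun (st : List Int × Int) d =>
        (st.1 ++ [PySem.Int.floordiv (st.2 * base + d) nr],
         PySem.Int.mod (st.2 * base + d) nr)) (([] : List Int), (0:Int)) := by
    rw [← hmap, ← List.map_reverse, List.foldl_map, hmap]
  simp only [h1, h2, foldl_fst_eq_quotDigits, List.nil_append]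

-- the digit list B's loop appends, as a structural recursion
def diffDigits (nr bse h0 q0 : Int) : List Int → List Int
  | [] => []
  | d :: L =>
      (PySem.Int.floordiv (h0 * bse + d) nr - bse * q0)
        :: diffDigits nr bse (h0 * bse + d) (PySem.Int.floordiv (h0 * bse + d) nr) L

theorem foldl_fst_eq_diffDigits (nr bse : Int) (L : List Int) :
    ∀ (res0 : List Int) (h0 q0 : Int),
      (L.foldl (fun (st : List Int × Int × Int) d =>
        (st.1 ++ [PySem.Int.floordiv (st.2.1 * bse + d) nr - bse * st.2.2],
         st.2.1 * bse + d, PySem.Int.floordiv (st.2.1 * bse + d) nr))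
        (res0, h0, q0)).1 = res0 ++ diffDigits nr bse h0 q0 L := by
  induction L with
  | nil => intro res0 h0 q0; simp [diffDigits]
  | cons d L ih =>
      intro res0 h0 q0
      simp only [List.foldl_cons, diffDigits, ih, List.append_assoc, List.singleton_append]

-- floor-division shift identities, valid for every nonzero divisor (Python's // and %)
theorem fmod_add_mul_self (a b c : Int) (hc : c ≠ 0) : (a + b * c).fmod c = a.fmod c := by
  have h1 := Int.fdiv_add_fmod (a + b * c) c
  have h2 := Int.fdiv_add_fmod a c
  have h3 := Int.add_mul_fdiv_right a b hc
  linear_combination h1 - h2 - c * h3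

-- B's prefix-quotient difference equals A's carried-remainder digit, step by step
theorem diffDigits_eq_quotDigits (nr bse : Int) (hnr : nr ≠ 0) (L : List Int) :
    ∀ h0 : Int, diffDigits nr bse h0 (PySem.Int.floordiv h0 nr) L
      = quotDigits nr bse (PySem.Int.mod h0 nr) L := by
  induction L with
  | nil => intro h0; rfl
  | cons d L ih =>
      intro h0
      have hsplit : PySem.Int.mod h0 nr * bse + d
          = (h0 * bse + d) + (-(bse * h0.fdiv nr)) * nr := by
        have hfm := Int.fdiv_add_fmod h0 nr
        show h0.fmod nr * bse + d = _
        linear_combination (bse : Int) * hfm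
      have hhead : PySem.Int.floordiv (PySem.Int.mod h0 nr * bse + d) nr
          = PySem.Int.floordiv (h0 * bse + d) nr - bse * PySem.Int.floordiv h0 nr := by
        show (PySem.Int.mod h0 nr * bse + d).fdiv nr = (h0 * bse + d).fdiv nr - bse * h0.fdiv nr
        rw [hsplit, Int.add_mul_fdiv_right _ _ hnr]
        ring
      have htail : PySem.Int.mod (PySem.Int.mod h0 nr * bse + d) nr
          = PySem.Int.mod (h0 * bse + d) nr := by
        show (PySem.Int.mod h0 nr * bse + d).fmod nr = (h0 * bse + d).fmod nr
        rw [hsplit, fmod_add_mul_self _ _ _ hnr]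
      simp only [quotDigits, diffDigits, hhead, htail]
      rw [ih (h0 * bse + d)]

-- popping trailing zeros of the reversed list = dropping leading zeros, then reversing
theorem popTrail_reverse (l : List Int) : popTrail l.reverse = (divPop l).reverse := by
  induction l with
  | nil => rw [popTrail]; simp [divPop]
  | cons x xs ih =>
      rw [List.reverse_cons, popTrail]
      by_cases hx : x = 0
      · subst hx
        rw [dif_pos (by simp), List.dropLast_concat, ih]
        simp [divPop]
      · rw [dif_neg (by simp [hx])]
        simp [divPop, hx]

-- ===== VERDICT (by name: the statement is the Claim_ definition above) =====
theorem div_spec : Claim_equal_div := by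
  intro a nr base _ hpre
  unfold Spec_div
  rcases hpre with rfl | hnr
  · simp [div, div_alt, divPop, popTrail]
  · rw [div_eq_quotDigits]
    unfold div_alt
    show (divPop (quotDigits nr base 0 a.reverse)).reverse = popTrail _
    rw [foldl_fst_eq_diffDigits, List.nil_append]
    have h0 : (0 : Int) = PySem.Int.floordiv 0 nr := by
      show (0:Int) = Int.fdiv 0 nr; simp
    have hm : PySem.Int.mod 0 nr = 0 := by
      show Int.fmod 0 nr = 0; simp
    rw [show diffDigits nr base 0 0 a.reverse
          = diffDigits nr base 0 (PySem.Int.floordiv 0 nr) a.reverse by rw [← h0],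
        diffDigits_eq_quotDigits nr base hnr, hm, popTrail_reverse]
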